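-- pv_equiv track=rewrite | github.com/minn-jun/Maplestory_Symbol_Calc | optimizer.py | _calculate_upgrade_cost
-- ===== SOURCE A (Python) =====
-- def _calculate_upgrade_cost(area, current_level, target_level, symbol_data_set, cost_cache):
--     """심볼 업그레이드 비용을 계산하고 캐시합니다."""
--     cache_key = (area, current_level, target_level)
--     if cache_key in cost_cache:
--         return cost_cache[cache_key]
--
--     total_cost = 0
--     for level in range(current_level + 1, target_level + 1):
--         cost = symbol_data_set.get(area, {}).get(level, 0)
--         total_cost += cost
--
--     result = total_cost * 10000
--     cost_cache[cache_key] = result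
--     return result
-- ===== SOURCE B (Python) =====
-- def _calculate_upgrade_cost(area, current_level, target_level, symbol_data_set, cost_cache):
--     """Same result as A: instead of walking every level in the range, walk the
--     area's level table once and sum the costs whose level lies in range."""
--     cache_key = (area, current_level, target_level)
--     if cache_key in cost_cache:
--         return cost_cache[cache_key]
--     table = symbol_data_set.get(area, {})
--     result = 10000 * sum(cost for level, cost in table.items()
--                          if current_level < level <= target_level)
--     cost_cache[cache_key] = result
--     return result
-- ===== Notes on version B (the rewrite author's own statement) =====
-- stated objective: alternative
-- what changed: B sums by a single filtered pass over the area's level table (levels inside (current_level, target_level]) instead of looping over every level of the range with a dict lookup per level.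
import Mathlib
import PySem

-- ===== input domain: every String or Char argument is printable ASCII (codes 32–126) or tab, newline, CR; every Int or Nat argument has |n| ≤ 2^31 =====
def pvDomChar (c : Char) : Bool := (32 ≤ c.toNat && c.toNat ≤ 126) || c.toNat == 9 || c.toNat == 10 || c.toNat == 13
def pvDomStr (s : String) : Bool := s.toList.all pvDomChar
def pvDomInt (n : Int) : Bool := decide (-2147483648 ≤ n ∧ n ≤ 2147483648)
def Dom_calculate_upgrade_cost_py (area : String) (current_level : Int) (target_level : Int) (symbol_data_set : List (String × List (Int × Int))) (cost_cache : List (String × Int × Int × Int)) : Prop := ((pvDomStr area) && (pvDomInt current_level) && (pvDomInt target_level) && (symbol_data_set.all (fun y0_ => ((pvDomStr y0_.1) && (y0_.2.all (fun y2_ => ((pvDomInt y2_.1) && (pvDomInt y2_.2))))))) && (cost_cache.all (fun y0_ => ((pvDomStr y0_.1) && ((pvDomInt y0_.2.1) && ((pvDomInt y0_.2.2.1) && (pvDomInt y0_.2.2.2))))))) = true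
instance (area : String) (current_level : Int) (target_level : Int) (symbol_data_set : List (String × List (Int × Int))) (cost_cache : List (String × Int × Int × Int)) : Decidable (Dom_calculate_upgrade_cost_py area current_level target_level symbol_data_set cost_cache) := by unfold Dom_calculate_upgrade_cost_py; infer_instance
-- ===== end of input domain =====

-- B replaces A's per-level loop over range(current_level+1, target_level+1) by a single
-- filtered pass over the area's level table (alternative traversal); the proof is about the
-- RETURN value only — both Pythons also insert the result into cost_cache identically.

-- ===== PORT A =====
-- symbol_data_set.get(area, {}) : first match in the association list, default empty
def pvAreaTable (symbol_data_set : List (String × List (Int × Int))) (area : String) : List (Int × Int) :=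
  (((symbol_data_set.find? (fun p => p.1 == area)).map Prod.snd).getD [])

-- tbl.get(level, 0) : first match, default 0
def pvLevelGet (tbl : List (Int × Int)) (level : Int) : Int :=
  (((tbl.find? (fun p => p.1 == level)).map Prod.snd).getD 0)

-- cache_key in cost_cache / cost_cache[cache_key] : first matching (area, cur, tgt) entry
def pvCacheGet? (cost_cache : List (String × Int × Int × Int)) (area : String) (cur tgt : Int) : Option Int :=
  ((cost_cache.find? (fun e => e.1 == area && e.2.1 == cur && e.2.2.1 == tgt)).map (fun e => e.2.2.2))

def calculate_upgrade_cost_py (area : String) (current_level : Int) (target_level : Int) (symbol_data_set : List (String × List (Int × Int))) (cost_cache : List (String × Int × Int × Int)) : Int :=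
  match pvCacheGet? cost_cache area current_level target_level with
  | some v => v
  | none =>
    -- for level in range(current_level+1, target_level+1): total += get(area).get(level, 0)
    let total_cost := (PySem.List.pyRange (current_level + 1) (target_level + 1) 1).foldl
      (fun acc level => acc + pvLevelGet (pvAreaTable symbol_data_set area) level) 0
    total_cost * 10000

-- ===== PORT B =====
def calculate_upgrade_cost_py_alt (area : String) (current_level : Int) (target_level : Int) (symbol_data_set : List (String × List (Int × Int))) (cost_cache : List (String × Int × Int × Int)) : Int :=
  match pvCacheGet? cost_cache area current_level target_level with
  | some v => v
  | none =>
    -- 10000 * sum(cost for level, cost in table.items() if current_level < level <= target_level)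
    10000 * (((pvAreaTable symbol_data_set area).filter
        (fun p => current_level < p.1 && p.1 ≤ target_level)).map Prod.snd).sum

-- ===== PRECONDITION & SPEC =====
-- Pre_ excludes symbol_data_set whose per-area level table lists a level twice: a Python dict
-- cannot contain a duplicate key, so such association lists represent no Python input at all
-- (an artefact of the dict-as-list encoding); A counts only the first entry, B all of them.
def Pre_calculate_upgrade_cost_py (area : String) (current_level : Int) (target_level : Int) (symbol_data_set : List (String × List (Int × Int))) (cost_cache : List (String × Int × Int × Int)) : Prop :=
  ∀ p ∈ symbol_data_set, (p.2.map Prod.fst).Nodup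
instance (area : String) (current_level : Int) (target_level : Int) (symbol_data_set : List (String × List (Int × Int))) (cost_cache : List (String × Int × Int × Int)) : Decidable (Pre_calculate_upgrade_cost_py area current_level target_level symbol_data_set cost_cache) := by unfold Pre_calculate_upgrade_cost_py; infer_instance

def pvWitness_calculate_upgrade_cost_py : String × Int × Int × (List (String × List (Int × Int))) × (List (String × Int × Int × Int)) :=
  ("arcane", 0, 2, [("arcane", [(1, 3), (2, 4)])], [])

def Spec_calculate_upgrade_cost_py (area : String) (current_level : Int) (target_level : Int) (symbol_data_set : List (String × List (Int × Int))) (cost_cache : List (String × Int × Int × Int)) (out : Int) : Prop := out = calculate_upgrade_cost_py_alt area current_level target_level symbol_data_set cost_cache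
instance (area : String) (current_level : Int) (target_level : Int) (symbol_data_set : List (String × List (Int × Int))) (cost_cache : List (String × Int × Int × Int)) (out : Int) : Decidable (Spec_calculate_upgrade_cost_py area current_level target_level symbol_data_set cost_cache out) := by unfold Spec_calculate_upgrade_cost_py; infer_instance

-- ===== CLAIM (what is proved, stated in full; the proofs are below) =====
def Claim_equal_calculate_upgrade_cost_py : Prop := ∀ (area : String) (current_level : Int) (target_level : Int) (symbol_data_set : List (String × List (Int × Int))) (cost_cache : List (String × Int × Int × Int)), Dom_calculate_upgrade_cost_py area current_level target_level symbol_data_set cost_cache → Pre_calculate_upgrade_cost_py area current_level target_level symbol_data_set cost_cache → Spec_calculate_upgrade_cost_py area current_level target_level symbol_data_set cost_cache (calculate_upgrade_cost_py area current_level target_level symbol_data_set cost_cache)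

-- ===== LEMMAS AND PROOFS =====

-- a level absent from the table is read as 0 by A
theorem pvLevelGet_of_not_mem (tbl : List (Int × Int)) (k : Int) (h : k ∉ tbl.map Prod.fst) :
    pvLevelGet tbl k = 0 := by
  unfold pvLevelGet
  rw [List.find?_eq_none.mpr]
  · rfl
  · intro p hp hbeq
    exact h (List.mem_map.mpr ⟨p, hp, by simpa using hbeq⟩)

-- over a duplicate-free index list, the indicator sum collapses to a membership test
theorem pv_sum_ite_mem (L : List Int) (hL : L.Nodup) (k v : Int) :
    (L.map (fun l => if l = k then v else 0)).sum = if k ∈ L then v else 0 := by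
  induction L with
  | nil => simp
  | cons a L ih =>
    rcases List.nodup_cons.mp hL with ⟨ha, hL'⟩
    by_cases hak : a = k
    · subst hak
      simp [ih hL', ha]
    · simp [hak, Ne.symm hak, ih hL']

-- main invariant: A's per-index sum over any duplicate-free index list equals
-- B's filtered single pass over a duplicate-free table
theorem pv_sum_eq (tbl : List (Int × Int)) (htbl : (tbl.map Prod.fst).Nodup)
    (L : List Int) (hL : L.Nodup) :
    (L.map (pvLevelGet tbl)).sum = ((tbl.filter (fun p => decide (p.1 ∈ L))).map Prod.snd).sum := by
  induction tbl with
  | nil =>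
    have h0 : ∀ l ∈ L, pvLevelGet [] l = (fun _ : Int => (0 : Int)) l := fun _ _ => rfl
    rw [List.map_congr_left h0]
    simp
  | cons q rest ih =>
    obtain ⟨k, v⟩ := q
    rcases List.nodup_cons.mp htbl with ⟨hk, hrest⟩
    have hget : ∀ l : Int, pvLevelGet ((k, v) :: rest) l
        = (if l = k then v else 0) + pvLevelGet rest l := by
      intro l
      unfold pvLevelGet
      simp only [List.find?]
      by_cases hkl : k = l
      · subst hkl
        have h0 := pvLevelGet_of_not_mem rest k (by simpa using hk)
        unfold pvLevelGet at h0
        simp [h0]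
      · have hb : (k == l) = false := by simpa using hkl
        simp [hb, Ne.symm hkl]
    calc (L.map (pvLevelGet ((k, v) :: rest))).sum
        = (L.map (fun l => (if l = k then v else 0) + pvLevelGet rest l)).sum := by
          exact congrArg List.sum (List.map_congr_left (fun l _ => hget l))
      _ = (L.map (fun l => if l = k then v else 0)).sum + (L.map (pvLevelGet rest)).sum := by
          rw [PySem.List.sum_map_add_int]
      _ = (if k ∈ L then v else 0)
            + ((rest.filter (fun p => decide (p.1 ∈ L))).map Prod.snd).sum := by
          rw [pv_sum_ite_mem L hL, ih hrest]
      _ = ((((k, v) :: rest).filter (fun p => decide (p.1 ∈ L))).map Prod.snd).sum := by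
          by_cases hkL : k ∈ L <;> simp [List.filter, hkL]

-- ===== VERDICT (by name: the statement is the Claim_ definition above) =====
theorem calculate_upgrade_cost_py_spec : Claim_equal_calculate_upgrade_cost_py := by
  intro area cl tl sds cc _ hpre
  unfold Spec_calculate_upgrade_cost_py calculate_upgrade_cost_py calculate_upgrade_cost_py_alt
  cases pvCacheGet? cc area cl tl with
  | some v => rfl
  | none =>
    simp only []
    rw [PySem.List.foldl_add, zero_add, mul_comm]
    congr 1
    have htbl : ((pvAreaTable sds area).map Prod.fst).Nodup := by
      unfold pvAreaTable
      cases hf : sds.find? (fun p => p.1 == area) with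
      | none => simp
      | some p => simpa using hpre p (List.mem_of_find?_eq_some hf)
    rw [pv_sum_eq (pvAreaTable sds area) htbl _ (PySem.List.nodup_pyRange_one _ _)]
    have hfil : ∀ p ∈ pvAreaTable sds area,
        decide (p.1 ∈ PySem.List.pyRange (cl + 1) (tl + 1) 1)
          = (decide (cl < p.1) && decide (p.1 ≤ tl)) := by
      intro p _
      rw [Bool.eq_iff_iff]
      simp [PySem.List.mem_pyRange_one]
    rw [List.filter_congr hfil]
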